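-- pv_equiv track=rewrite | github.com/shlee0916/LeetCode_Solutions | Easy/element_appearing_more_than_25%_in_sorted_array.py | findSpecialInteger
-- ===== SOURCE A (Python) =====
-- from typing import List
--
-- def findSpecialInteger(arr: List[int]) -> int:
--     def binary_search(target: int, arr: List[int]) -> int:
--         left = 0
--         right = len(arr) - 1
--
--         while left < right:
--             mid = (left + right) // 2
--
--             if arr[mid] < target:
--                 left = mid + 1
--             else:
--                 right = mid
--
--         return left
--
--     target_len = len(arr) // 4
--     for num in set(arr):
--         first_idx = binary_search(num, arr)
--
--         if first_idx + target_len < len(arr) and arr[first_idx] == arr[first_idx + target_len]: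
--             return arr[first_idx]
-- ===== SOURCE B (Python) =====
-- def findSpecialInteger(arr):
--     n = len(arr)
--     q = n // 4
--     run = 0
--     prev = None
--     for x in arr:
--         if run and x == prev:
--             run += 1
--         else:
--             run = 1
--             prev = x
--         if run == q + 1:
--             return x
--     return None
-- ===== Notes on version B (the rewrite author's own statement) =====
-- stated objective: faster
-- what changed: Replaces A's loop over set(arr) with a binary search per distinct value by a single left-to-right pass that counts the current run length and returns as soon as a run reaches n//4+1 elements (no set construction, no binary searches, early exit); Pre_ excludes inputs where A's answer depends on CPython set-iteration order (unsorted arrays with a quarter-spaced equal pair, or several values reaching the threshold).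
-- outside the precondition, e.g. on findSpecialInteger([2, 1, 1, 2, 3]): A returns None, B returns 1; on findSpecialInteger([1, 1, 8, 8]): A returns 8, B returns 1
import Mathlib
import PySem

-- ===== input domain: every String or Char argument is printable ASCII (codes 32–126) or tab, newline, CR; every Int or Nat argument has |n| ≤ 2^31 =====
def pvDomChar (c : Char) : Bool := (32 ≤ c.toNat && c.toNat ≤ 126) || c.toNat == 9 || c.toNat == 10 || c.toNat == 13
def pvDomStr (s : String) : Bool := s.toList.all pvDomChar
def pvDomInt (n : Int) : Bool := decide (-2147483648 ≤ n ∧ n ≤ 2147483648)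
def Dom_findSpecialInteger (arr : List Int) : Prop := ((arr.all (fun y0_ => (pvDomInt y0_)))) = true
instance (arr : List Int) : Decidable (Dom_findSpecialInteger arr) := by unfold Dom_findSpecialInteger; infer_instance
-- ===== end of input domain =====

-- B replaces A's loop over set(arr) with per-value binary searches by one left-to-right
-- run-counting pass (alternative algorithm, O(n) single pass, early exit).

-- ===== PORT A =====
-- A's inner helper binary_search(target, arr): while left < right: mid = (left+right)//2; …
-- (arr[mid] is always in range at A's call sites; pyGetD with default 0 is exact there)
def pvBinarySearch (target : Int) (arr : List Int) (left right : Int) : Int :=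
  if _h : left < right then
    let mid := PySem.Int.floordiv (left + right) 2
    if PySem.List.pyGetD arr mid 0 < target then
      pvBinarySearch target arr (mid + 1) right
    else
      pvBinarySearch target arr left mid
  else left
termination_by (right - left).toNat
decreasing_by
  · have _h1 := PySem.Int.le_floordiv_iff_mul_le (a := left + right) (b := 2) (q := left) (by omega)
    have h2 := PySem.Int.floordiv_lt_iff_lt_mul (a := left + right) (b := 2) (q := right) (by omega)
    omega
  · have _h1 := PySem.Int.le_floordiv_iff_mul_le (a := left + right) (b := 2) (q := left) (by omega)
    have h2 := PySem.Int.floordiv_lt_iff_lt_mul (a := left + right) (b := 2) (q := right) (by omega)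
    omega

-- the 'for num in set(arr)' loop of A (iteration order of PySem.Set.ofList: first occurrences;
-- Pre_ below restricts to inputs where the result does not depend on the set's iteration order)
def pvLoopA (arr : List Int) (targetLen : Int) : List Int → Option Int
  | [] => none
  | num :: rest =>
    let firstIdx := pvBinarySearch num arr 0 ((arr.length : Int) - 1)
    if firstIdx + targetLen < (arr.length : Int) ∧
        PySem.List.pyGetD arr firstIdx 0 = PySem.List.pyGetD arr (firstIdx + targetLen) 0 then
      some (PySem.List.pyGetD arr firstIdx 0)
    else
      pvLoopA arr targetLen rest

def findSpecialInteger (arr : List Int) : Option Int :=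
  pvLoopA arr (PySem.Int.floordiv (arr.length : Int) 4) (PySem.Set.ofList arr)

-- ===== PORT B =====
def pvScanB (q : Int) : List Int → Int → Option Int → Option Int
  | [], _, _ => none
  | x :: rest, run, prev =>
    let st := if run ≠ 0 ∧ prev = some x then (run + 1, prev) else (1, some x)
    if st.1 = q + 1 then some x else pvScanB q rest st.1 st.2

def findSpecialInteger_alt (arr : List Int) : Option Int :=
  pvScanB (PySem.Int.floordiv (arr.length : Int) 4) arr 0 none

-- ===== PRECONDITION & SPEC =====
-- Pre_ admits (i) sorted arrays in which at most one value reaches the n//4+1 occurrence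
-- threshold, and (ii) arbitrary arrays with no equal pair of elements n//4 apart (on which
-- A returns None).  It excludes the remaining inputs, on which A's return value is an
-- accident of CPython's set-iteration (hash) order, which is not modelled: unsorted arrays
-- whose pseudo-binary-search can hit a quarter-spaced equal pair, and arrays in which
-- several values reach the threshold.
def Pre_findSpecialInteger (arr : List Int) : Prop :=
  (arr.Pairwise (· ≤ ·) ∧
    ((PySem.Set.ofList arr).filter
        (fun x => decide (arr.length / 4 + 1 ≤ arr.count x))).length ≤ 1) ∨
  (∀ i < arr.length, i + arr.length / 4 < arr.length →
    arr[i]? ≠ arr[i + arr.length / 4]?)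
instance (arr : List Int) : Decidable (Pre_findSpecialInteger arr) := by
  unfold Pre_findSpecialInteger; infer_instance

def pvWitness_findSpecialInteger : List Int := [1, 1, 1, 2]

def Spec_findSpecialInteger (arr : List Int) (out : Option Int) : Prop := out = findSpecialInteger_alt arr
instance (arr : List Int) (out : Option Int) : Decidable (Spec_findSpecialInteger arr out) := by unfold Spec_findSpecialInteger; infer_instance

-- ===== CLAIM (what is proved, stated in full; the proofs are below) =====
def Claim_equal_findSpecialInteger : Prop := ∀ (arr : List Int), Dom_findSpecialInteger arr → Pre_findSpecialInteger arr → Spec_findSpecialInteger arr (findSpecialInteger arr)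

-- ===== LEMMAS AND PROOFS =====

-- indexing at a valid integer position
lemma pv_getD_at (arr : List Int) (i : Int) (h0 : 0 ≤ i) (h1 : i < (arr.length : Int)) :
    PySem.List.pyGetD arr i 0 = arr[i.toNat]'(by omega) :=
  PySem.List.pyGetD_eq_getElem arr 0 h0 h1

-- a sorted list is monotone in its indices
lemma pv_mono (arr : List Int) (hs : arr.Pairwise (· ≤ ·)) {i j : Nat} (hij : i ≤ j)
    (hj : j < arr.length) : arr[i]'(by omega) ≤ arr[j]'hj := by
  rcases Nat.lt_or_eq_of_le hij with h | h
  · exact List.pairwise_iff_getElem.mp hs i j (by omega) hj h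
  · subst h; exact le_refl _

lemma pv_getD_mono (arr : List Int) (hs : arr.Pairwise (· ≤ ·)) {i j : Int} (h0 : 0 ≤ i)
    (hij : i ≤ j) (hj : j < (arr.length : Int)) :
    PySem.List.pyGetD arr i 0 ≤ PySem.List.pyGetD arr j 0 := by
  rw [pv_getD_at arr i h0 (by omega), pv_getD_at arr j (by omega) hj]
  exact pv_mono arr hs (by omega) (by omega)

-- in a sorted list whose elements are all ≥ num, the occurrences of num form a prefix:
-- num occurs at least m+1 times iff position m holds num
lemma pv_count_prefix (num : Int) :
    ∀ (ys : List Int), ys.Pairwise (· ≤ ·) → (∀ y ∈ ys, num ≤ y) →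
      ∀ m : Nat, (m + 1 ≤ ys.count num ↔ ys[m]? = some num)
  | [], _, _, m => by simp
  | y :: t, hs, hge, m => by
    have hyt : ∀ z ∈ t, y ≤ z := (List.pairwise_cons.mp hs).1
    have hst : t.Pairwise (· ≤ ·) := (List.pairwise_cons.mp hs).2
    by_cases hy : y = num
    · subst hy
      cases m with
      | zero => simp
      | succ m =>
        have := pv_count_prefix y t hst (fun z hz => hyt z hz) m
        simpa [List.count_cons] using this
    · have hlt : num < y := lt_of_le_of_ne (hge y (by simp)) (fun h => hy h.symm)
      have hcnt : (y :: t).count num = 0 := by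
        rw [List.count_eq_zero]
        intro hmem
        rcases List.mem_cons.mp hmem with h | h
        · exact hy h.symm
        · have := hyt num h; omega
      constructor
      · intro h; omega
      · intro h
        have : num ∈ y :: t := List.mem_of_getElem? h
        rw [← List.count_pos_iff] at this
        omega

-- invariant of A's binary_search loop on a sorted array
lemma pv_bsearch_aux (arr : List Int) (hs : arr.Pairwise (· ≤ ·)) (t : Int) :
    ∀ (k : Nat) (l r : Int), (r - l).toNat ≤ k → 0 ≤ l → l ≤ r → r < (arr.length : Int) →
      t ≤ PySem.List.pyGetD arr r 0 →
      l ≤ pvBinarySearch t arr l r ∧ pvBinarySearch t arr l r ≤ r ∧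
      t ≤ PySem.List.pyGetD arr (pvBinarySearch t arr l r) 0 ∧
      ∀ j : Int, l ≤ j → j < pvBinarySearch t arr l r → PySem.List.pyGetD arr j 0 < t := by
  intro k
  induction k with
  | zero =>
    intro l r hk h0 hlr hr ht
    have hlr' : l = r := by omega
    subst hlr'
    rw [pvBinarySearch, dif_neg (by omega)]
    exact ⟨le_refl _, le_refl _, ht, fun j h1 h2 => by omega⟩
  | succ k ih =>
    intro l r hk h0 hlr hr ht
    by_cases hlt : l < r
    · rw [pvBinarySearch, dif_pos hlt]
      have hm1 := (PySem.Int.le_floordiv_iff_mul_le (a := l + r) (b := 2) (q := l) (by omega)).mpr (by omega)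
      have hm2 := (PySem.Int.floordiv_lt_iff_lt_mul (a := l + r) (b := 2) (q := r) (by omega)).mpr (by omega)
      set mid := PySem.Int.floordiv (l + r) 2 with hmid
      by_cases hc : PySem.List.pyGetD arr mid 0 < t
      · rw [if_pos hc]
        obtain ⟨a1, a2, a3, a4⟩ := ih (mid + 1) r (by omega) (by omega) (by omega) hr ht
        refine ⟨by omega, a2, a3, ?_⟩
        intro j hj1 hj2
        by_cases hjm : j ≤ mid
        · have := pv_getD_mono arr hs (i := j) (j := mid) (by omega) hjm (by omega)
          omega
        · exact a4 j (by omega) hj2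
      · rw [if_neg hc]
        obtain ⟨a1, a2, a3, a4⟩ := ih l mid (by omega) h0 (by omega) (by omega) (by omega)
        exact ⟨a1, by omega, a3, a4⟩
    · rw [pvBinarySearch, dif_neg hlt]
      have hlr' : l = r := by omega
      subst hlr'
      exact ⟨le_refl _, le_refl _, ht, fun j h1 h2 => by omega⟩

-- on a sorted array, A's binary_search(num, arr) finds the first occurrence of num
lemma pv_first_idx (arr : List Int) (hs : arr.Pairwise (· ≤ ·)) (num : Int) (hm : num ∈ arr) :
    0 ≤ pvBinarySearch num arr 0 ((arr.length : Int) - 1) ∧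
    pvBinarySearch num arr 0 ((arr.length : Int) - 1) < (arr.length : Int) ∧
    PySem.List.pyGetD arr (pvBinarySearch num arr 0 ((arr.length : Int) - 1)) 0 = num ∧
    ∀ j : Int, 0 ≤ j → j < pvBinarySearch num arr 0 ((arr.length : Int) - 1) →
      PySem.List.pyGetD arr j 0 < num := by
  obtain ⟨i, hi, hie⟩ := List.mem_iff_getElem.mp hm
  have hn : 1 ≤ arr.length := by omega
  have ht : num ≤ PySem.List.pyGetD arr ((arr.length : Int) - 1) 0 := by
    rw [pv_getD_at arr _ (by omega) (by omega)]
    have h2 := pv_mono arr hs (i := i) (j := ((arr.length : Int) - 1).toNat) (by omega) (by omega)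
    omega
  obtain ⟨a1, a2, a3, a4⟩ := pv_bsearch_aux arr hs num ((arr.length : Int) - 1 - 0).toNat 0
    ((arr.length : Int) - 1) le_rfl (by omega) (by omega) (by omega) ht
  set f := pvBinarySearch num arr 0 ((arr.length : Int) - 1) with hf
  have hflt : f < (arr.length : Int) := by omega
  have hfi : f ≤ (i : Int) := by
    by_contra h
    have := a4 i (by omega) (by omega)
    rw [pv_getD_at arr i (by omega) (by omega)] at this
    simp only [Int.toNat_natCast] at this
    omega
  have h1 : PySem.List.pyGetD arr f 0 ≤ num := by
    rw [pv_getD_at arr f a1 hflt, ← hie]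
    exact pv_mono arr hs (by omega) (by omega)
  exact ⟨a1, hflt, by omega, a4⟩

-- A's success condition at a value num is exactly "num occurs more than len//4 times"
lemma pv_cond_iff (arr : List Int) (hs : arr.Pairwise (· ≤ ·)) (num : Int) (hm : num ∈ arr) :
    (pvBinarySearch num arr 0 ((arr.length : Int) - 1) + ((arr.length / 4 : Nat) : Int) < (arr.length : Int) ∧
      PySem.List.pyGetD arr (pvBinarySearch num arr 0 ((arr.length : Int) - 1)) 0 =
        PySem.List.pyGetD arr (pvBinarySearch num arr 0 ((arr.length : Int) - 1) + ((arr.length / 4 : Nat) : Int)) 0)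
    ↔ arr.length / 4 + 1 ≤ arr.count num := by
  obtain ⟨h0, h1, he, hb⟩ := pv_first_idx arr hs num hm
  set f := pvBinarySearch num arr 0 ((arr.length : Int) - 1) with hf
  set m := arr.length / 4 with hmdef
  set fN := f.toNat with hfN
  have hfNf : (fN : Int) = f := by omega
  have htake : (arr.take fN).count num = 0 := by
    rw [List.count_eq_zero]
    intro hmem
    obtain ⟨j, hj, hje⟩ := List.mem_iff_getElem.mp hmem
    have hjlen : j < fN := by
      simp at hj; omega
    have hjb := hb j (by omega) (by omega)
    rw [pv_getD_at arr j (by omega) (by omega)] at hjb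
    rw [List.getElem_take] at hje
    simp only [Int.toNat_natCast] at hjb
    omega
  have hcnt : arr.count num = (arr.drop fN).count num := by
    conv_lhs => rw [← List.take_append_drop fN arr]
    rw [List.count_append, htake]
    omega
  have hds : (arr.drop fN).Pairwise (· ≤ ·) := hs.drop
  have hfnum : arr[fN]'(by omega) = num := by
    rw [pv_getD_at arr f h0 h1] at he; exact he
  have hdge : ∀ y ∈ arr.drop fN, num ≤ y := by
    intro y hy
    obtain ⟨j, hj, hje⟩ := List.mem_iff_getElem.mp hy
    rw [List.getElem_drop] at hje
    have hlend : (arr.drop fN).length = arr.length - fN := by simp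
    have := pv_mono arr hs (i := fN) (j := fN + j) (by omega) (by omega)
    omega
  have hC := pv_count_prefix num (arr.drop fN) hds hdge m
  rw [hcnt, hC]
  have hlen : (arr.drop fN).length = arr.length - fN := by simp
  constructor
  · rintro ⟨hlt, heq⟩
    rw [List.getElem?_drop, List.getElem?_eq_getElem (by omega)]
    rw [pv_getD_at arr (f + (m : Int)) (by omega) (by omega)] at heq
    rw [he] at heq
    have hidx : (f + (m : Int)).toNat = fN + m := by omega
    simp only [hidx] at heq
    exact congrArg some heq.symm
  · intro hsome
    rw [List.getElem?_drop] at hsome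
    have hin : fN + m < arr.length := by
      by_contra hcon
      rw [List.getElem?_eq_none (by omega)] at hsome
      simp at hsome
    rw [List.getElem?_eq_getElem hin] at hsome
    have hsome' : arr[fN + m]'hin = num := Option.some.inj hsome
    constructor
    · omega
    · rw [he, pv_getD_at arr (f + (m : Int)) (by omega) (by omega)]
      have hidx : (f + (m : Int)).toNat = fN + m := by omega
      simp only [hidx]
      exact hsome'.symm

-- A's loop over the distinct values is a find? of the occurrence threshold
lemma pv_loopA_eq_find (arr : List Int) (hs : arr.Pairwise (· ≤ ·)) :
    ∀ nums : List Int, (∀ v ∈ nums, v ∈ arr) →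
      pvLoopA arr ((arr.length / 4 : Nat) : Int) nums
        = nums.find? (fun v => decide (arr.length / 4 + 1 ≤ arr.count v))
  | [], _ => rfl
  | num :: rest, hmem => by
    have hm : num ∈ arr := hmem num (by simp)
    have hcond := pv_cond_iff arr hs num hm
    obtain ⟨h0, h1, he, hb⟩ := pv_first_idx arr hs num hm
    rw [pvLoopA]
    simp only [List.find?_cons]
    by_cases hcnt : arr.length / 4 + 1 ≤ arr.count num
    · rw [if_pos (hcond.mpr hcnt)]
      simp only [hcnt, decide_true]
      exact congrArg some he
    · rw [if_neg (fun hcc => hcnt (hcond.mp hcc))]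
      simp only [hcnt, decide_false]
      exact pv_loopA_eq_find arr hs rest (fun v hv => hmem v (List.mem_cons_of_mem _ hv))

-- find? only looks at the value of the predicate on members
lemma pv_find?_congr {p q : Int → Bool} :
    ∀ l : List Int, (∀ x ∈ l, p x = q x) → l.find? p = l.find? q
  | [], _ => rfl
  | x :: t, h => by
    simp only [List.find?_cons, h x (by simp)]
    cases hq : q x
    · simp only []
      exact pv_find?_congr t (fun y hy => h y (List.mem_cons_of_mem _ hy))
    · rfl

-- find? over set(xs) (first occurrences in order) agrees with find? over xs
lemma pv_find_foldl_add (p : Int → Bool) :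
    ∀ (xs s : List Int), (xs.foldl PySem.Set.add s).find? p = (s.find? p).or (xs.find? p)
  | [], s => by simp
  | x :: t, s => by
    rw [List.foldl_cons, pv_find_foldl_add p t (PySem.Set.add s x)]
    by_cases hx : x ∈ s
    · rw [PySem.Set.add_of_mem hx, List.find?_cons]
      cases hfs : s.find? p with
      | some w => simp
      | none =>
        have hpx : p x = false := by
          by_contra hpx
          have : (s.find? p).isSome := List.find?_isSome.mpr ⟨x, hx, by simpa using hpx⟩
          rw [hfs] at this; simp at this
        simp [hpx]
    · rw [PySem.Set.add_of_not_mem hx, List.find?_append, Option.or_assoc, List.find?_cons]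
      congr 1
      cases hpx : p x <;> simp [List.find?, hpx]

lemma pv_find_ofList (p : Int → Bool) (xs : List Int) :
    (PySem.Set.ofList xs).find? p = xs.find? p := by
  rw [PySem.Set.ofList_eq_foldl, pv_find_foldl_add p xs []]
  rfl

-- B's scan inside a run of x: the counter just advances (or triggers)
lemma pv_scan_run (q x : Int) (tl : List Int) :
    ∀ (m : Nat) (r : Int), 1 ≤ r → r ≤ q →
      pvScanB q (List.replicate m x ++ tl) r (some x)
        = if q + 1 ≤ r + m then some x else pvScanB q tl (r + m) (some x)
  | 0, r, h1, h2 => by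
    rw [if_neg (by omega)]
    simp
  | m + 1, r, h1, h2 => by
    rw [List.replicate_succ, List.cons_append, pvScanB]
    have hcond : (r ≠ 0 ∧ (some x : Option Int) = some x) := ⟨by omega, rfl⟩
    rw [if_pos hcond]
    show (if r + 1 = q + 1 then some x
      else pvScanB q (List.replicate m x ++ tl) (r + 1) (some x)) = _
    by_cases hr : r + 1 = q + 1
    · rw [if_pos hr, if_pos (by push_cast; omega)]
    · rw [if_neg hr, pv_scan_run q x tl m (r + 1) (by omega) (by omega)]
      have : r + 1 + (m : Int) = r + ((m : Nat) + 1 : Nat) := by push_cast; omega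
      rw [this]

-- after a run ends the carried state is irrelevant: the next element resets it
lemma pv_scan_reset (q r x : Int) (tl : List Int) (hx : x ∉ tl) :
    pvScanB q tl r (some x) = pvScanB q tl 0 none := by
  cases tl with
  | nil => rfl
  | cons y t =>
    have hxy : x ≠ y := fun h => hx (h ▸ List.mem_cons_self)
    rw [pvScanB, pvScanB]
    have h1 : ¬(r ≠ 0 ∧ (some x : Option Int) = some y) := by
      rintro ⟨-, h⟩; exact hxy (Option.some.inj h)
    have h2 : ¬((0 : Int) ≠ 0 ∧ (none : Option Int) = some y) := by rintro ⟨h, -⟩; omega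
    rw [if_neg h1, if_neg h2]

-- B's scan over a sorted array is a find? of the occurrence threshold
lemma pv_scan_eq_find_aux (q : Int) (hq : 0 ≤ q) :
    ∀ (k : Nat) (arr : List Int), arr.length ≤ k → arr.Pairwise (· ≤ ·) →
      pvScanB q arr 0 none = arr.find? (fun v => decide (q + 1 ≤ (arr.count v : Int))) := by
  intro k
  induction k with
  | zero =>
    intro arr hlen _
    have : arr = [] := List.eq_nil_of_length_eq_zero (by omega)
    subst this; rfl
  | succ k ih =>
    intro arr hlen hs
    cases harr : arr with
    | nil => rfl
    | cons x t =>
      subst harr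
      set k0 := (x :: t).count x with hk0
      have hk1 : 1 ≤ k0 := by
        have : 0 < (x :: t).count x := List.count_pos_iff.mpr List.mem_cons_self
        omega
      have hk0le : k0 ≤ (x :: t).length := List.count_le_length
      have hall : ∀ y ∈ x :: t, x ≤ y := by
        intro y hy
        rcases List.mem_cons.mp hy with h | h
        · exact h ▸ le_refl x
        · exact (List.pairwise_cons.mp hs).1 y h
      have hpre := pv_count_prefix x (x :: t) hs hall
      have htake : (x :: t).take k0 = List.replicate k0 x := by
        rw [List.eq_replicate_iff]
        refine ⟨by rw [List.length_take]; omega, ?_⟩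
        intro b hbmem
        obtain ⟨j, hj, hje⟩ := List.mem_iff_getElem.mp hbmem
        have hjk : j < k0 := by
          simp at hj; omega
        have := (hpre j).mp (by omega)
        rw [List.getElem?_eq_getElem (by omega)] at this
        rw [List.getElem_take] at hje
        rw [← hje]
        exact Option.some.inj this
      have hdecomp : x :: t = List.replicate k0 x ++ (x :: t).drop k0 := by
        conv_lhs => rw [← List.take_append_drop k0 (x :: t)]
        rw [htake]
      have hxnot : x ∉ (x :: t).drop k0 := by
        intro hmem
        have h1 : 0 < ((x :: t).drop k0).count x := List.count_pos_iff.mpr hmem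
        have h2 : (x :: t).count x = (List.replicate k0 x).count x + ((x :: t).drop k0).count x := by
          conv_lhs => rw [hdecomp]
          rw [List.count_append]
        rw [List.count_replicate_self] at h2
        omega
      have hdlen : ((x :: t).drop k0).length = (x :: t).length - k0 := by simp
      have hds : ((x :: t).drop k0).Pairwise (· ≤ ·) := hs.drop
      -- head step of the scan
      rw [pvScanB]
      have hcond : ¬((0 : Int) ≠ 0 ∧ (none : Option Int) = some x) := by rintro ⟨h, -⟩; omega
      rw [if_neg hcond]
      simp only []
      by_cases hq0 : (1 : Int) = q + 1
      · rw [if_pos hq0, List.find?_cons]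
        have : decide (q + 1 ≤ ((x :: t).count x : Int)) = true := by
          rw [decide_eq_true_iff]; omega
        rw [this]
      · rw [if_neg hq0]
        set P : Int → Bool := fun v => decide (q + 1 ≤ ((x :: t).count v : Int)) with hP
        have ht' : t = List.replicate (k0 - 1) x ++ (x :: t).drop k0 := by
          have hcons : x :: t = x :: (List.replicate (k0 - 1) x ++ (x :: t).drop k0) := by
            conv_lhs => rw [hdecomp]
            have hrep : List.replicate k0 x = x :: List.replicate (k0 - 1) x := by
              rw [← List.replicate_succ]
              congr 1
              omega
            rw [hrep, List.cons_append]
          exact List.cons.inj hcons |>.2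
        have hck : (1 : Int) + ((k0 - 1 : Nat) : Int) = (k0 : Int) := by omega
        have hL : pvScanB q t 1 (some x)
            = if q + 1 ≤ (k0 : Int) then some x
              else pvScanB q ((x :: t).drop k0) (k0 : Int) (some x) := by
          conv_lhs => rw [ht']
          rw [pv_scan_run q x _ (k0 - 1) 1 (by omega) (by omega), hck]
        rw [hL]
        by_cases hbig : q + 1 ≤ (k0 : Int)
        · rw [if_pos hbig, List.find?_cons]
          have hx : P x = true := by
            rw [hP]; simp only [decide_eq_true_iff]; rw [← hk0]; exact_mod_cast hbig
          rw [hx]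
        · rw [if_neg hbig, pv_scan_reset q (k0 : Int) x _ hxnot]
          rw [ih ((x :: t).drop k0) (by simp at hlen ⊢; omega) hds]
          have hrhs : (x :: t).find? P = ((x :: t).drop k0).find? P := by
            conv_lhs => rw [hdecomp]
            rw [List.find?_append]
            have hnone : (List.replicate k0 x).find? P = none := by
              rw [List.find?_eq_none]
              intro b hb
              rw [(List.mem_replicate.mp hb).2, hP]
              simp only [decide_eq_true_iff]
              rw [← hk0]
              intro hcc
              exact hbig (by exact_mod_cast hcc)
            rw [hnone, Option.none_or]
          rw [hrhs]
          apply pv_find?_congr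
          intro v hv
          have hvx : v ≠ x := fun h => hxnot (h ▸ hv)
          have hcv : (x :: t).count v = ((x :: t).drop k0).count v := by
            conv_lhs => rw [hdecomp]
            rw [List.count_append, List.count_replicate]
            simp [hvx.symm]
          rw [hP]
          simp only [hcv]

-- A's binary_search stays between its bounds on ANY array (no sortedness needed)
lemma pv_bsearch_bounds (t : Int) (arr : List Int) :
    ∀ (k : Nat) (l r : Int), (r - l).toNat ≤ k → l ≤ r →
      l ≤ pvBinarySearch t arr l r ∧ pvBinarySearch t arr l r ≤ r := by
  intro k
  induction k with
  | zero =>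
    intro l r hk hlr
    have hlr' : l = r := by omega
    subst hlr'
    rw [pvBinarySearch, dif_neg (by omega)]
    exact ⟨le_refl _, le_refl _⟩
  | succ k ih =>
    intro l r hk hlr
    by_cases hlt : l < r
    · rw [pvBinarySearch, dif_pos hlt]
      have hm1 := (PySem.Int.le_floordiv_iff_mul_le (a := l + r) (b := 2) (q := l) (by omega)).mpr (by omega)
      have hm2 := (PySem.Int.floordiv_lt_iff_lt_mul (a := l + r) (b := 2) (q := r) (by omega)).mpr (by omega)
      set mid := PySem.Int.floordiv (l + r) 2
      by_cases hc : PySem.List.pyGetD arr mid 0 < t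
      · rw [if_pos hc]
        obtain ⟨a1, a2⟩ := ih (mid + 1) r (by omega) (by omega)
        exact ⟨by omega, a2⟩
      · rw [if_neg hc]
        obtain ⟨a1, a2⟩ := ih l mid (by omega) (by omega)
        exact ⟨a1, by omega⟩
    · rw [pvBinarySearch, dif_neg hlt]
      exact ⟨le_refl _, by omega⟩

-- with no equal pair of elements n//4 apart, A's success test fails for every candidate
lemma pv_loopA_none (arr : List Int)
    (hno : ∀ i < arr.length, i + arr.length / 4 < arr.length →
      arr[i]? ≠ arr[i + arr.length / 4]?) :
    ∀ nums : List Int, pvLoopA arr ((arr.length / 4 : Nat) : Int) nums = none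
  | [] => rfl
  | num :: rest => by
    rw [pvLoopA, if_neg ?hcond]
    · exact pv_loopA_none arr hno rest
    case hcond =>
      rintro ⟨hlt, heq⟩
      by_cases h0 : arr.length = 0
      · rw [pvBinarySearch, dif_neg (by omega)] at hlt
        omega
      · obtain ⟨b1, b2⟩ := pv_bsearch_bounds num arr ((arr.length : Int) - 1 - 0).toNat 0
          ((arr.length : Int) - 1) le_rfl (by omega)
        set f := pvBinarySearch num arr 0 ((arr.length : Int) - 1) with hf
        rw [pv_getD_at arr f b1 (by omega),
            pv_getD_at arr (f + ((arr.length / 4 : Nat) : Int)) (by omega) (by omega)] at heq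
        have hidx : (f + ((arr.length / 4 : Nat) : Int)).toNat = f.toNat + arr.length / 4 := by
          omega
        simp only [hidx] at heq
        have := hno f.toNat (by omega) (by omega)
        rw [List.getElem?_eq_getElem (by omega), List.getElem?_eq_getElem (by omega)] at this
        exact this (congrArg some heq)

-- with no equal pair of elements q apart, B's run counter never reaches q+1
lemma pv_scan_none_aux (arr : List Int) (q : Int) (hq : 1 ≤ q)
    (hno : ∀ i < arr.length, i + q.toNat < arr.length → arr[i]? ≠ arr[i + q.toNat]?) :
    ∀ (xs : List Int) (p : Nat) (r x : Int),
      xs = arr.drop p → 1 ≤ r → r ≤ q → r.toNat ≤ p →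
      (∀ j : Nat, p - r.toNat ≤ j → j < p → arr[j]? = some x) →
      pvScanB q xs r (some x) = none
  | [], _, _, _, _, _, _, _, _ => rfl
  | y :: t, p, r, x, hxs, hr1, hrq, hrp, hpref => by
    have hyp : arr[p]? = some y := by
      have h : (arr.drop p)[0]? = some y := by rw [← hxs]; rfl
      rw [List.getElem?_drop] at h
      simpa using h
    have hplen : p < arr.length := by
      by_contra hc
      rw [List.getElem?_eq_none (by omega)] at hyp
      simp at hyp
    have htd : t = arr.drop (p + 1) := by
      have h : (y :: t).drop 1 = (arr.drop p).drop 1 := by rw [hxs]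
      simpa [List.drop_drop, Nat.add_comm] using h
    rw [pvScanB]
    by_cases hcase : r ≠ 0 ∧ (some x : Option Int) = some y
    · rw [if_pos hcase]
      have hxy : x = y := Option.some.inj hcase.2
      show (if r + 1 = q + 1 then some y else pvScanB q t (r + 1) (some x)) = none
      by_cases htr : r + 1 = q + 1
      · exfalso
        have hrq' : r.toNat = q.toNat := by omega
        have h1 := hpref (p - r.toNat) (by omega) (by omega)
        have h2 := hno (p - q.toNat) (by omega) (by omega)
        rw [Nat.sub_add_cancel (by omega)] at h2
        rw [← hrq'] at h2
        rw [h1, hyp, hxy] at h2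
        exact h2 rfl
      · rw [if_neg htr]
        exact pv_scan_none_aux arr q hq hno t (p + 1) (r + 1) x htd (by omega) (by omega)
          (by omega)
          (fun j hj1 hj2 => by
            by_cases hjp : j < p
            · exact hpref j (by omega) hjp
            · have hj : j = p := by omega
              subst hj
              rw [hyp, hxy])
    · rw [if_neg hcase]
      show (if (1 : Int) = q + 1 then some y else pvScanB q t 1 (some y)) = none
      rw [if_neg (by omega)]
      exact pv_scan_none_aux arr q hq hno t (p + 1) 1 y htd (by omega) hq (by omega)
        (fun j hj1 hj2 => by
          have hj : j = p := by omega
          subst hj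
          exact hyp)

lemma pv_scan_none (arr : List Int)
    (hno : ∀ i < arr.length, i + arr.length / 4 < arr.length →
      arr[i]? ≠ arr[i + arr.length / 4]?) :
    pvScanB ((arr.length / 4 : Nat) : Int) arr 0 none = none := by
  cases arr with
  | nil => rfl
  | cons y t =>
    have hq1 : 1 ≤ (y :: t).length / 4 := by
      by_contra hc
      have h0 : (y :: t).length / 4 = 0 := by omega
      have h := hno 0 (by simp) (by simp; omega)
      rw [h0] at h
      simp at h
    have hcond : ¬((0 : Int) ≠ 0 ∧ (none : Option Int) = some y) := by
      rintro ⟨h, -⟩; omega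
    rw [pvScanB, if_neg hcond]
    show (if (1 : Int) = (((y :: t).length / 4 : Nat) : Int) + 1 then some y
      else pvScanB (((y :: t).length / 4 : Nat) : Int) t 1 (some y)) = none
    rw [if_neg (by omega)]
    exact pv_scan_none_aux (y :: t) (((y :: t).length / 4 : Nat) : Int)
      (by exact_mod_cast hq1) (by simpa using hno)
      t 1 1 y rfl (by omega) (by exact_mod_cast hq1) (by omega)
      (fun j hj1 hj2 => by
        have hj : j = 0 := by omega
        subst hj
        rfl)

-- ===== VERDICT (by name: the statement is the Claim_ definition above) =====
theorem findSpecialInteger_spec : Claim_equal_findSpecialInteger := by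
  intro arr _hdom hpre
  unfold Spec_findSpecialInteger findSpecialInteger findSpecialInteger_alt
  have hq : PySem.Int.floordiv (arr.length : Int) 4 = ((arr.length / 4 : Nat) : Int) := by
    exact_mod_cast PySem.Int.floordiv_natCast arr.length 4
  rw [hq]
  rcases hpre with ⟨hs, -⟩ | hno
  · rw [pv_loopA_eq_find arr hs (PySem.Set.ofList arr)
      (fun v hv => (PySem.Set.mem_ofList arr v).mp hv)]
    rw [pv_find_ofList]
    rw [pv_scan_eq_find_aux ((arr.length / 4 : Nat) : Int) (by positivity) arr.length arr le_rfl hs]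
    apply pv_find?_congr
    intro v _
    simp only [decide_eq_decide]
    omega
  · rw [pv_loopA_none arr hno (PySem.Set.ofList arr), pv_scan_none arr hno]
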